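-- pv_equiv track=rewrite | github.com/boris-pavel/Dominoes | Dominoes/task/dominoes/dominoes.py | count_appearances
-- ===== SOURCE A (Python) =====
-- def count_appearances(domino_snake, hand):
--     d = {i: 0 for i in range(7)}
--     for piece in domino_snake:
--         d[piece[0]] += 1
--         d[piece[1]] += 1
--     for piece in hand:
--         d[piece[0]] += 1
--         d[piece[1]] += 1
--     return d
-- ===== SOURCE B (Python) =====
-- def count_appearances(domino_snake, hand):
--     pieces = domino_snake + hand
--
--     def histogram(chunk):
--         if len(chunk) <= 1:
--             d = {i: 0 for i in range(7)}
--             for piece in chunk: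
--                 d[piece[0]] += 1
--                 d[piece[1]] += 1
--             return d
--         mid = len(chunk) // 2
--         left = histogram(chunk[:mid])
--         right = histogram(chunk[mid:])
--         return {i: left[i] + right[i] for i in range(7)}
--
--     return histogram(pieces)
-- ===== Notes on version B (the rewrite author's own statement) =====
-- stated objective: alternative
-- what changed: B replaces A's single pass that mutates one running pre-seeded dict by a divide-and-conquer: it recursively builds the pip histogram of each half of the combined pieces and merges the two sub-histograms key-wise over 0..6.
import Mathlib
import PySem

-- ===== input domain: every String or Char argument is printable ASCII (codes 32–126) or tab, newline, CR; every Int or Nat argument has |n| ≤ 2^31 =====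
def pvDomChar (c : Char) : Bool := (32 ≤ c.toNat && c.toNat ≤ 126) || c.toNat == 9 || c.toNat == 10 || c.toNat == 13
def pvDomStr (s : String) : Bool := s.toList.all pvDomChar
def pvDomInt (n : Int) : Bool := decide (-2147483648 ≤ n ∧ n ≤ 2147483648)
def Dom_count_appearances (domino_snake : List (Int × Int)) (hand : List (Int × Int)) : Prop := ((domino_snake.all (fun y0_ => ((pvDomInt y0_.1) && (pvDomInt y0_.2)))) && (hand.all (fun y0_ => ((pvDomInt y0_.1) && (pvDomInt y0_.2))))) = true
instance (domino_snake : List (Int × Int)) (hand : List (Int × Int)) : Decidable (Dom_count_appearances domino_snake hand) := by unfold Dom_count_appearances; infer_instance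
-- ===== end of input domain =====

-- B replaces A's single pass mutating one running dict by a divide-and-conquer that builds
-- histograms of the two halves and merges them key-wise (objective: alternative, not faster).

-- ===== PORT A =====
-- d[piece[0]] += 1 ; d[piece[1]] += 1   (KeyError on a pip outside 0..6 — excluded by Pre_)
def caStep (d : PySem.Dict Int Int) (piece : Int × Int) : PySem.Dict Int Int :=
  let d1 := d.insert piece.1 (d.getD piece.1 0 + 1)
  d1.insert piece.2 (d1.getD piece.2 0 + 1)

def count_appearances (domino_snake : List (Int × Int)) (hand : List (Int × Int)) : List (Int × Int) :=
  let d := (PySem.List.pyRange 0 7 1).foldl (fun d i => d.insert i 0) PySem.Dict.empty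
  let d := domino_snake.foldl caStep d
  let d := hand.foldl caStep d
  d.items

-- ===== PORT B =====
-- the leaf body: d = {i: 0 for i in range(7)}; then for the ≤1 piece, d[piece[0]] += 1; d[piece[1]] += 1
def cbLeafStep (d : PySem.Dict Int Int) (piece : Int × Int) : PySem.Dict Int Int :=
  let d1 := d.insert piece.1 (d.getD piece.1 0 + 1)
  d1.insert piece.2 (d1.getD piece.2 0 + 1)

-- histogram(chunk): chunk[:mid] / chunk[mid:] with 0 ≤ mid ≤ len are List.take / List.drop exactly;
-- {i: left[i] + right[i] for i in range(7)} — left[i]/right[i] are present keys, so getD is exact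
def cbHistogram (chunk : List (Int × Int)) : PySem.Dict Int Int :=
  if chunk.length ≤ 1 then
    chunk.foldl cbLeafStep ((PySem.List.pyRange 0 7 1).foldl (fun d i => d.insert i 0) PySem.Dict.empty)
  else
    let mid := chunk.length / 2
    let left := cbHistogram (chunk.take mid)
    let right := cbHistogram (chunk.drop mid)
    (PySem.List.pyRange 0 7 1).foldl (fun d i => d.insert i (left.getD i 0 + right.getD i 0)) PySem.Dict.empty
termination_by chunk.length
decreasing_by
  · simp only [List.length_take]; omega
  · simp only [List.length_drop]; omega

def count_appearances_alt (domino_snake : List (Int × Int)) (hand : List (Int × Int)) : List (Int × Int) :=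
  (cbHistogram (domino_snake ++ hand)).items

-- ===== PRECONDITION & SPEC =====
-- Pre_ excludes exactly the inputs on which A raises KeyError: a pip value outside 0..6.
def Pre_count_appearances (domino_snake : List (Int × Int)) (hand : List (Int × Int)) : Prop :=
  ∀ p ∈ domino_snake ++ hand, (0 ≤ p.1 ∧ p.1 ≤ 6) ∧ (0 ≤ p.2 ∧ p.2 ≤ 6)
instance (domino_snake : List (Int × Int)) (hand : List (Int × Int)) : Decidable (Pre_count_appearances domino_snake hand) := by unfold Pre_count_appearances; infer_instance

def pvWitness_count_appearances : (List (Int × Int)) × (List (Int × Int)) := ([(0, 1), (3, 3), (2, 5), (6, 0)], [(4, 4), (1, 6), (5, 2)])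

def Spec_count_appearances (domino_snake : List (Int × Int)) (hand : List (Int × Int)) (out : List (Int × Int)) : Prop := out = count_appearances_alt domino_snake hand
instance (domino_snake : List (Int × Int)) (hand : List (Int × Int)) (out : List (Int × Int)) : Decidable (Spec_count_appearances domino_snake hand out) := by unfold Spec_count_appearances; infer_instance

-- ===== CLAIM (what is proved, stated in full; the proofs are below) =====
def Claim_equal_count_appearances : Prop := ∀ (domino_snake : List (Int × Int)) (hand : List (Int × Int)), Dom_count_appearances domino_snake hand → Pre_count_appearances domino_snake hand → Spec_count_appearances domino_snake hand (count_appearances domino_snake hand)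

-- ===== LEMMAS AND PROOFS =====

-- the common normal form both proofs reach: keys 0..6 in order, each with its pip count
def hist7 (L : List (Int × Int)) : List (Int × Int) :=
  ([0, 1, 2, 3, 4, 5, 6] : List Int).map (fun i => (i, ((L.flatMap fun p => [p.1, p.2]).count i : Int)))

-- an increment loop over in-range pips, started from the seeded dict, yields exactly hist7's pairs
theorem foldl_incr_items (L : List Int) (hL : ∀ x ∈ L, 0 ≤ x ∧ x ≤ 6) :
    (L.foldl (fun d x => d.insert x (d.getD x 0 + 1))
        ((PySem.List.pyRange 0 7 1).foldl (fun d i => d.insert i 0) PySem.Dict.empty)).items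
      = ([0, 1, 2, 3, 4, 5, 6] : List Int).map (fun i => (i, (L.count i : Int))) := by
  set d0 : PySem.Dict Int Int :=
    (PySem.List.pyRange 0 7 1).foldl (fun d i => d.insert i 0) PySem.Dict.empty with hd0
  have hk : d0.keys = [0, 1, 2, 3, 4, 5, 6] := by rw [hd0]; decide
  have hkeys : (L.foldl (fun d x => d.insert x (d.getD x 0 + 1)) d0).keys = d0.keys := by
    rw [PySem.Dict.keys_foldl_insert, PySem.Set.update_eq_append_filter]
    have : ((PySem.Set.ofList L).filter fun y => !(PySem.Set.contains d0.keys y)) = [] := by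
      apply List.filter_eq_nil_iff.mpr
      intro y hy
      have h6 := hL y ((PySem.Set.mem_ofList _ _).mp hy)
      have : y ∈ d0.keys := by rw [hk]; simp; omega
      simpa using this
    rw [this, List.append_nil]
  have hnodup : (L.foldl (fun d x => d.insert x (d.getD x 0 + 1)) d0).keys.Nodup := by
    apply PySem.Dict.nodup_keys_foldl_insert
    rw [hd0]; decide
  rw [PySem.Dict.items_eq_map_keys _ hnodup 0, hkeys, hk]
  apply List.map_congr_left
  intro i hi
  have h0 : d0.getD i 0 = 0 := by rw [hd0]; fin_cases hi <;> decide
  simp only [Prod.mk.injEq]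
  exact ⟨trivial, by rw [PySem.Dict.getD_foldl_insert_add_one, h0, zero_add]⟩

-- A touches the two pips of each piece in order: the piece loop is the pip loop over the flattening
theorem caStep_eq_pairs (L : List (Int × Int)) (d : PySem.Dict Int Int) :
    L.foldl caStep d
      = (L.flatMap fun p => [p.1, p.2]).foldl (fun d x => d.insert x (d.getD x 0 + 1)) d := by
  induction L generalizing d with
  | nil => rfl
  | cons p t ih =>
    simp only [List.flatMap_cons, List.foldl_append, List.foldl_cons, ih]
    rfl

theorem pips_in_range (L : List (Int × Int))
    (hpre : ∀ p ∈ L, (0 ≤ p.1 ∧ p.1 ≤ 6) ∧ (0 ≤ p.2 ∧ p.2 ≤ 6)) :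
    ∀ x ∈ (L.flatMap fun p => [p.1, p.2]), 0 ≤ x ∧ x ≤ 6 := by
  intro x hx
  simp only [List.mem_flatMap] at hx
  obtain ⟨p, hp, hxp⟩ := hx
  have := hpre p hp
  simp only [List.mem_cons, List.not_mem_nil, or_false] at hxp
  rcases hxp with rfl | rfl
  · exact this.1
  · exact this.2

-- B's invariant: every recursive call returns its chunk's histogram as hist7
theorem cbHistogram_items (chunk : List (Int × Int))
    (hpre : ∀ p ∈ chunk, (0 ≤ p.1 ∧ p.1 ≤ 6) ∧ (0 ≤ p.2 ∧ p.2 ≤ 6)) :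
    (cbHistogram chunk).items = hist7 chunk := by
  rw [cbHistogram]
  by_cases hle : chunk.length ≤ 1
  · rw [if_pos hle]
    have hstep : chunk.foldl cbLeafStep
        ((PySem.List.pyRange 0 7 1).foldl (fun d i => d.insert i 0) PySem.Dict.empty)
        = (chunk.flatMap fun p => [p.1, p.2]).foldl (fun d x => d.insert x (d.getD x 0 + 1))
          ((PySem.List.pyRange 0 7 1).foldl (fun d i => d.insert i 0) PySem.Dict.empty) := by
      match chunk with
      | [] => rfl
      | [p] => rfl
      | p :: q :: t => simp at hle
    rw [hstep, foldl_incr_items _ (pips_in_range chunk hpre)]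
    rfl
  · rw [if_neg hle]
    have hmidlt : chunk.length / 2 < chunk.length := by omega
    have hmidpos : 1 ≤ chunk.length / 2 := by omega
    have ihl := cbHistogram_items (chunk.take (chunk.length / 2))
      (fun p hp => hpre p (List.mem_of_mem_take hp))
    have ihr := cbHistogram_items (chunk.drop (chunk.length / 2))
      (fun p hp => hpre p (List.mem_of_mem_drop hp))
    have hrange : PySem.List.pyRange 0 7 1 = ([0, 1, 2, 3, 4, 5, 6] : List Int) := by decide
    -- values of the two sub-histograms at each key 0..6
    have hgetl : ∀ i ∈ ([0, 1, 2, 3, 4, 5, 6] : List Int),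
        (cbHistogram (chunk.take (chunk.length / 2))).getD i 0
          = (((chunk.take (chunk.length / 2)).flatMap fun p => [p.1, p.2]).count i : Int) := by
      intro i hi
      have hknd : (cbHistogram (chunk.take (chunk.length / 2))).keys = ([0, 1, 2, 3, 4, 5, 6] : List Int) := by
        simp [PySem.Dict.keys, ihl, hist7]
      apply PySem.Dict.getD_of_mem_items
      · rw [ihl, hist7]; exact List.mem_map_of_mem hi
      · rw [hknd]; decide
    have hgetr : ∀ i ∈ ([0, 1, 2, 3, 4, 5, 6] : List Int),
        (cbHistogram (chunk.drop (chunk.length / 2))).getD i 0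
          = (((chunk.drop (chunk.length / 2)).flatMap fun p => [p.1, p.2]).count i : Int) := by
      intro i hi
      have hknd : (cbHistogram (chunk.drop (chunk.length / 2))).keys = ([0, 1, 2, 3, 4, 5, 6] : List Int) := by
        simp [PySem.Dict.keys, ihr, hist7]
      apply PySem.Dict.getD_of_mem_items
      · rw [ihr, hist7]; exact List.mem_map_of_mem hi
      · rw [hknd]; decide
    dsimp only
    rw [hrange]
    have hitems : ∀ (f : Int → Int),
        ((([0, 1, 2, 3, 4, 5, 6] : List Int)).foldl (fun d i => d.insert i (f i)) PySem.Dict.empty).items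
          = ([0, 1, 2, 3, 4, 5, 6] : List Int).map (fun i => (i, f i)) := fun f => rfl
    rw [hitems, hist7]
    apply List.map_congr_left
    intro i hi
    rw [hgetl i hi, hgetr i hi]
    have hsplit : chunk = chunk.take (chunk.length / 2) ++ chunk.drop (chunk.length / 2) :=
      (List.take_append_drop _ _).symm
    conv_rhs => rw [hsplit]
    rw [List.flatMap_append, List.count_append]
    push_cast
    ring
termination_by chunk.length
decreasing_by
  · simp only [List.length_take]; omega
  · simp only [List.length_drop]; omega

-- ===== VERDICT (by name: the statement is the Claim_ definition above) =====
theorem count_appearances_spec : Claim_equal_count_appearances := by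
  intro s h _ hpre
  unfold Spec_count_appearances count_appearances count_appearances_alt
  dsimp only
  rw [← List.foldl_append, caStep_eq_pairs,
      foldl_incr_items _ (pips_in_range _ hpre),
      cbHistogram_items _ hpre]
  rfl
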